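-- pv_equiv track=rewrite | github.com/anthonyriachy/foundations-cs-python | midterm/main.py | display_statistics
-- ===== SOURCE A (Python) =====
-- def display_statistics(ticket_list):
--     element_occurance={} #dictionary that has key=the id of the event, and data=number of occurance of that id
--     for ticket in ticket_list: #ticket list is a list of dicitionaries each dic has the ticket data
--         event_id=ticket['event_id']
--
--         if(event_id in element_occurance):
--             element_occurance[event_id]+=1
--         else: #add a new event in the dictionary and initilize to 1
--             element_occurance[event_id]=1
--
--     Max_occurance=0
--     event_id_index=[]
--     for index in element_occurance:
--         if(element_occurance[index]>Max_occurance):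
--             Max_occurance=element_occurance[index] #find max occurance
--
--     for index in element_occurance:
--         if(Max_occurance == element_occurance[index]):
--             event_id_index.append(index) #find all the tickets that are ewaule to max occurance
--
--     return event_id_index
-- ===== SOURCE B (Python) =====
-- def display_statistics(ticket_list):
--     counts = {}
--     for ticket in ticket_list:
--         eid = ticket['event_id']
--         counts[eid] = counts.get(eid, 0) + 1
--     buckets = {}  # count -> list of event_ids with that count, in first-seen order
--     for eid, c in counts.items():
--         buckets.setdefault(c, []).append(eid)
--     if not buckets:
--         return []
--     return buckets[max(buckets)]
-- ===== Notes on version B (the rewrite author's own statement) =====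
-- stated objective: alternative
-- what changed: B replaces A's two scans over the count dict (one to find the max, one to collect ids) by an inverted index from count to ids built in one pass, answered by a single max-key lookup.
import Mathlib
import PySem

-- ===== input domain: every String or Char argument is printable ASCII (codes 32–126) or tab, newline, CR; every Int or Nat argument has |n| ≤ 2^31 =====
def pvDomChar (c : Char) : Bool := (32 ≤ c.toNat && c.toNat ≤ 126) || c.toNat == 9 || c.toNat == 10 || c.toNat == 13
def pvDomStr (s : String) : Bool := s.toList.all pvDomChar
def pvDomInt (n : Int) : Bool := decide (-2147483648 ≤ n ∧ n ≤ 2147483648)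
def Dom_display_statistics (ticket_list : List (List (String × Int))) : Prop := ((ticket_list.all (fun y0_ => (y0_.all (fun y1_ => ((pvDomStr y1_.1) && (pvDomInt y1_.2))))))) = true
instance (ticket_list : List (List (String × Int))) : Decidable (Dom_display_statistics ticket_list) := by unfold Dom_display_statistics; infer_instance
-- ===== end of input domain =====

-- B builds an inverted index count -> ids and answers by a max-key lookup, instead of A's
-- two comparison scans over the count dict; return values proved equal wherever A returns.

-- shared helper: ticket['event_id'] (Pre_ guarantees the key is present, so getD's default is never used)
def evKey (t : List (String × Int)) : Int := (PySem.Dict.mk t).getD "event_id" 0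

-- ===== PORT A =====
def display_statistics (ticket_list : List (List (String × Int))) : List Int :=
  let occ : PySem.Dict Int Int :=
    ticket_list.foldl (fun d t =>
      let eid := evKey t
      if d.contains eid then d.modify eid 0 (· + 1) else d.insert eid 1) PySem.Dict.empty
  let maxOcc : Int :=
    occ.keys.foldl (fun mx k => if occ.getD k 0 > mx then occ.getD k 0 else mx) 0
  occ.keys.foldl (fun acc k => if maxOcc == occ.getD k 0 then acc ++ [k] else acc) []

-- ===== PORT B =====
def display_statistics_alt (ticket_list : List (List (String × Int))) : List Int :=
  let counts : PySem.Dict Int Int :=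
    ticket_list.foldl (fun d t =>
      let eid := evKey t
      d.insert eid (d.getD eid 0 + 1)) PySem.Dict.empty
  let buckets : PySem.Dict Int (List Int) :=
    counts.items.foldl (fun b p => b.modify p.2 [] (· ++ [p.1])) PySem.Dict.empty
  match PySem.List.max? buckets.keys (fun x => x) with
  | none => []
  | some m => buckets.getD m []

-- ===== PRECONDITION & SPEC =====
-- Pre_ excludes exactly the tickets lacking the key 'event_id', on which A raises KeyError.
def Pre_display_statistics (ticket_list : List (List (String × Int))) : Prop :=
  ∀ t ∈ ticket_list, (PySem.Dict.mk t).contains "event_id" = true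
instance (ticket_list : List (List (String × Int))) : Decidable (Pre_display_statistics ticket_list) := by unfold Pre_display_statistics; infer_instance
def pvWitness_display_statistics : (List (List (String × Int))) :=
  [[("event_id", 1)], [("event_id", 2)], [("event_id", 1)]]
def Spec_display_statistics (ticket_list : List (List (String × Int))) (out : List Int) : Prop := out = display_statistics_alt ticket_list
instance (ticket_list : List (List (String × Int))) (out : List Int) : Decidable (Spec_display_statistics ticket_list out) := by unfold Spec_display_statistics; infer_instance

-- ===== CLAIM (what is proved, stated in full; the proofs are below) =====
def Claim_equal_display_statistics : Prop := ∀ (ticket_list : List (List (String × Int))), Dom_display_statistics ticket_list → Pre_display_statistics ticket_list → Spec_display_statistics ticket_list (display_statistics ticket_list)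

-- ===== LEMMAS AND PROOFS =====

-- A's counting step equals B's counting step
lemma stepA_eq_stepB (d : PySem.Dict Int Int) (k : Int) :
    (if d.contains k then d.modify k 0 (· + 1) else d.insert k 1)
      = d.insert k (d.getD k 0 + 1) := by
  by_cases h : d.contains k = true
  · simp [h]; rfl
  · rw [if_neg h, PySem.Dict.getD_of_not_contains]
    · norm_num
    · simpa using h

-- (if a > mx then a else mx) is a running max
lemma if_gt_eq_max (mx a : Int) : (if a > mx then a else mx) = max mx a := by
  split <;> omega

-- the heart of the equivalence: from any count dict with nodup keys and nonnegative
-- values, A's two scans and B's inverted index produce the same id list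
lemma scans_eq_buckets (d : PySem.Dict Int Int) (hnd : d.keys.Nodup)
    (hpos : ∀ k ∈ d.keys, 0 ≤ d.getD k 0) :
    (d.keys.foldl (fun acc k =>
        if (d.keys.foldl (fun mx k => if d.getD k 0 > mx then d.getD k 0 else mx) 0)
            == d.getD k 0 then acc ++ [k] else acc) [])
      = (match PySem.List.max?
            (d.items.foldl (fun b p => b.modify p.2 [] (· ++ [p.1])) PySem.Dict.empty).keys
            (fun x => x) with
         | none => []
         | some m => (d.items.foldl (fun b p => b.modify p.2 [] (· ++ [p.1]))
                        PySem.Dict.empty).getD m []) := by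
  set f : Int → Int := fun k => d.getD k 0 with hf
  rw [PySem.List.foldl_congr_mem d.keys _ (fun mx k => max mx (f k)) 0
      (fun acc k _ => if_gt_eq_max acc (f k))]
  set M : Int := d.keys.foldl (fun mx k => max mx (f k)) 0 with hMdef
  rw [PySem.List.foldl_append_if_eq_filter (fun k => M == f k) d.keys []]
  set b : PySem.Dict Int (List Int) :=
    d.items.foldl (fun b p => b.modify p.2 [] (· ++ [p.1])) PySem.Dict.empty with hb
  have hbform : b = (d.keys.map (fun k => (f k, k))).foldl
      (fun b p => b.modify p.1 [] (· ++ [p.2])) PySem.Dict.empty := by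
    rw [hb, PySem.Dict.items_eq_map_keys d hnd 0]
    simp only [List.foldl_map]
    rfl
  have hbkeys : b.keys = PySem.Set.ofList (d.keys.map f) := by
    rw [hbform,
      PySem.Dict.keys_foldl_modify_key (List.map (fun k => (f k, k)) d.keys)
        (fun p => p.1) [] (fun (_ : PySem.Dict Int (List Int)) (p : Int × Int) => (· ++ [p.2]))]
    simp only [List.map_map, PySem.Dict.keys_empty]
    rfl
  have hbget : ∀ c, b.getD c [] = d.keys.filter (fun k => f k == c) := by
    intro c
    rw [hbform, PySem.Dict.getD_foldl_modify_append]
    simp [List.filter_map, List.map_map, Function.comp_def]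
  rcases hcase : PySem.List.max? b.keys (fun x => x) with _ | m
  · have hnil : b.keys = [] := (PySem.List.max?_eq_none_iff _ _).1 hcase
    have hkeysnil : d.keys = [] := by
      rw [hbkeys] at hnil
      by_contra h
      obtain ⟨k, hk⟩ := List.exists_mem_of_ne_nil d.keys h
      have : f k ∈ PySem.Set.ofList (d.keys.map f) :=
        (PySem.Set.mem_ofList _ _).2 (List.mem_map_of_mem hk)
      simp [hnil] at this
    simp [hkeysnil]
  · have hmmem : m ∈ d.keys.map f :=
      (PySem.Set.mem_ofList _ _).1 (hbkeys ▸ PySem.List.max?_mem hcase)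
    have hmmax : ∀ y ∈ d.keys.map f, y ≤ m := fun y hy =>
      PySem.List.max?_isMax hcase y (hbkeys ▸ (PySem.Set.mem_ofList _ _).2 hy)
    have hMfold : M = (d.keys.map f).foldl max 0 := by
      rw [hMdef, List.foldl_map]
    have hMle := PySem.List.le_foldl_max_int d.keys f 0
    have hMm : M = m := by
      obtain ⟨k, hk, hfk⟩ := List.mem_map.1 hmmem
      have h1 : m ≤ M := hfk ▸ hMle.2 k hk
      have h2 : M ≤ m := by
        rcases hMfold ▸ PySem.List.foldl_max_mem (d.keys.map f) 0 with h0 | hmem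
        · rw [h0, ← hfk]
          exact hpos k hk
        · exact hmmax _ hmem
      omega
    simp only [List.nil_append]
    show List.filter (fun k => M == f k) d.keys = b.getD m []
    rw [hbget m, hMm]
    exact List.filter_congr (fun k _ => by
      rcases eq_or_ne (f k) m with h | h
      · simp [h]
      · simp [h, Ne.symm h])

theorem display_statistics_spec : Claim_equal_display_statistics := by
  intro tl _ _
  unfold Spec_display_statistics display_statistics display_statistics_alt
  simp only []
  rw [PySem.List.foldl_congr_mem tl _
      (fun d t => d.insert (evKey t) (d.getD (evKey t) 0 + 1)) PySem.Dict.empty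
      (fun acc t _ => stepA_eq_stepB acc (evKey t))]
  set d : PySem.Dict Int Int := tl.foldl (fun d t => d.insert (evKey t) (d.getD (evKey t) 0 + 1)) PySem.Dict.empty with hd
  have hform : d = (tl.map evKey).foldl (fun d x => d.insert x (d.getD x 0 + 1)) PySem.Dict.empty := by
    rw [List.foldl_map]
  have hnd : d.keys.Nodup := by
    rw [hd]
    exact PySem.Dict.nodup_keys_foldl_insert_key tl evKey _ _ PySem.Dict.nodup_keys_empty
  have hpos : ∀ k ∈ d.keys, 0 ≤ d.getD k 0 := by
    intro k _
    rw [hform, PySem.Dict.getD_foldl_insert_add_one]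
    simp [PySem.Dict.getD_empty]
  exact scans_eq_buckets d hnd hpos
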